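-- pv_equiv track=rewrite | github.com/shrimalmadhur/finalyzer | backend/parsers/amex_year_end_pdf.py | _extract_category_from_context
-- ===== SOURCE A (Python) =====
-- def _extract_category_from_context(text: str, position: int) -> str | None:
--     """Try to extract category from surrounding context."""
--     # Look backwards for category headers
--     categories = [
--         "Entertainment",
--         "Merchandise & Supplies",
--         "Restaurant",
--         "Transportation",
--         "Travel",
--         "Fees & Adjustments",
--         "Other",
--         "Airline",
--         "Travel Agencies",
--         "Taxis & Coach",
--         "Rail Services",
--         "Miscellaneous",
--         "Internet Purchase",
--     ]
--
--     # Get text before the transaction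
--     context = text[:position]
--
--     # Find the most recent category header
--     last_category = None
--     last_pos = -1
--
--     for category in categories:
--         pos = context.rfind(category)
--         if pos > last_pos:
--             last_pos = pos
--             last_category = category
--
--     return last_category
-- ===== SOURCE B (Python) =====
-- def _extract_category_from_context(text: str, position: int) -> str | None:
--     """Try to extract category from surrounding context."""
--     categories = [
--         "Entertainment",
--         "Merchandise & Supplies",
--         "Restaurant",
--         "Transportation",
--         "Travel",
--         "Fees & Adjustments",
--         "Other",
--         "Airline",
--         "Travel Agencies",
--         "Taxis & Coach",
--         "Rail Services",
--         "Miscellaneous",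
--         "Internet Purchase",
--     ]
--     context = text[:position]
--     # Single backward scan: the first position (from the right) where any
--     # category starts is the most recent header; ties at the same start
--     # position resolve to the earlier-listed category.
--     for i in range(len(context), -1, -1):
--         for category in categories:
--             if context.startswith(category, i):
--                 return category
--     return None
-- ===== Notes on version B (the rewrite author's own statement) =====
-- stated objective: alternative
-- what changed: Instead of running 13 independent context.rfind scans and tracking the maximum start position, B makes a single backward scan over start positions of context (trying the categories in list order at each position) and returns on the first hit, which is automatically the most recent header with ties resolved to the earlier-listed category.
import Mathlib
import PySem

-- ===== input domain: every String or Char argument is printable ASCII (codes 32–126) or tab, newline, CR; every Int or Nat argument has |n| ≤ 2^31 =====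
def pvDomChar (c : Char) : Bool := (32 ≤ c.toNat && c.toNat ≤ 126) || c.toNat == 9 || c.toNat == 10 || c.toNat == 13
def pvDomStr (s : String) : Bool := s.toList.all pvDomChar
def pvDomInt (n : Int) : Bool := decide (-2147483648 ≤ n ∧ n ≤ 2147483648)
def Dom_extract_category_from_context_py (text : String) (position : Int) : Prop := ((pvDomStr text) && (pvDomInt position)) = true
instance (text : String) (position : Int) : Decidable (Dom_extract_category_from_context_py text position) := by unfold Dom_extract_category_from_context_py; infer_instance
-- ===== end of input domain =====

-- B replaces A's 13 independent rfind scans by one backward scan over start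
-- positions with early return (alternative decomposition, same exact result).


-- the literal category list both Pythons contain
def pyCategories : List String :=
  ["Entertainment", "Merchandise & Supplies", "Restaurant", "Transportation",
   "Travel", "Fees & Adjustments", "Other", "Airline", "Travel Agencies",
   "Taxis & Coach", "Rail Services", "Miscellaneous", "Internet Purchase"]

-- ===== PORT A =====
-- 'for category in categories: pos = context.rfind(category); if pos > last_pos: …'
def aLoop (context : String) : List String → Int → Option String → Option String
  | [], _, lastCat => lastCat
  | category :: rest, lastPos, lastCat =>
      let pos := PySem.Str.rfind context category
      if pos > lastPos then aLoop context rest pos (some category)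
      else aLoop context rest lastPos lastCat

def extract_category_from_context_py (text : String) (position : Int) : Option String :=
  let context := PySem.Str.slice text none (some position)   -- text[:position]
  aLoop context pyCategories (-1) none

-- ===== PORT B =====
-- inner loop: 'for category in categories: if context.startswith(category, i): return category'
-- (exact: for 0 ≤ i, context.startswith(category, i) is category being a prefix of context[i:])
def checkAt (ctx : List Char) (i : Nat) : List String → Option String
  | [] => none
  | category :: rest =>
      if PySem.Chars.startswith (ctx.drop i) category.toList then some category
      else checkAt ctx i rest

-- outer loop: 'for i in range(len(context), -1, -1): …' with early return
def scanBack (ctx : List Char) (cats : List String) : Nat → Option String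
  | 0 => checkAt ctx 0 cats
  | i + 1 =>
      match checkAt ctx (i + 1) cats with
      | some c => some c
      | none => scanBack ctx cats i

def extract_category_from_context_py_alt (text : String) (position : Int) : Option String :=
  let context := PySem.Str.slice text none (some position)   -- text[:position]
  scanBack context.toList pyCategories context.toList.length

-- ===== PRECONDITION & SPEC =====
def Spec_extract_category_from_context_py (text : String) (position : Int) (out : Option String) : Prop := out = extract_category_from_context_py_alt text position
instance (text : String) (position : Int) (out : Option String) : Decidable (Spec_extract_category_from_context_py text position out) := by unfold Spec_extract_category_from_context_py; infer_instance

-- ===== CLAIM (what is proved, stated in full; the proofs are below) =====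
def Claim_equal_extract_category_from_context_py : Prop := ∀ (text : String) (position : Int), Dom_extract_category_from_context_py text position → Spec_extract_category_from_context_py text position (extract_category_from_context_py text position)

-- ===== LEMMAS AND PROOFS =====

-- running maximum of the rfind positions, and first category attaining a value
def bestPos (context : String) : List String → Int → Int
  | [], p => p
  | c :: cs, p => bestPos context cs (max p (PySem.Str.rfind context c))

def firstAt (context : String) (m : Int) : List String → Option String
  | [] => none
  | c :: cs => if PySem.Str.rfind context c = m then some c else firstAt context m cs

-- ---- facts about PySem.Chars.rfind.go (no spec lemma exists in the prelude) ----
theorem rfind_go_zero (s sub : List Char) :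
    PySem.Chars.rfind.go s sub 0 = if sub.isPrefixOf s then 0 else -1 := rfl

theorem rfind_go_succ (s sub : List Char) (j : Nat) :
    PySem.Chars.rfind.go s sub (j + 1) =
      if sub.isPrefixOf (s.drop (j + 1)) then ((j : Int) + 1) else PySem.Chars.rfind.go s sub j := rfl

theorem rfind_go_ge (s sub : List Char) (n : Nat) : -1 ≤ PySem.Chars.rfind.go s sub n := by
  induction n with
  | zero =>
    rw [rfind_go_zero]
    split_ifs <;> omega
  | succ j ih =>
    rw [rfind_go_succ]
    split_ifs with hp
    · omega
    · exact ih

theorem rfind_go_le (s sub : List Char) (n : Nat) : PySem.Chars.rfind.go s sub n ≤ n := by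
  induction n with
  | zero =>
    rw [rfind_go_zero]
    split_ifs <;> omega
  | succ j ih =>
    rw [rfind_go_succ]
    split_ifs with hp
    · omega
    · omega

theorem rfind_go_occ (s sub : List Char) (n : Nat)
    (h : 0 ≤ PySem.Chars.rfind.go s sub n) :
    sub.isPrefixOf (s.drop (PySem.Chars.rfind.go s sub n).toNat) = true := by
  induction n with
  | zero =>
    rw [rfind_go_zero] at h ⊢
    split_ifs at h ⊢ with hp
    · simpa using hp
    · omega
  | succ j ih =>
    rw [rfind_go_succ] at h ⊢
    split_ifs at h ⊢ with hp
    · have hc : ((j : Int) + 1).toNat = j + 1 := by omega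
      rw [hc]
      exact hp
    · exact ih h

theorem rfind_go_max (s sub : List Char) (n i : Nat) (hi : i ≤ n)
    (h : sub.isPrefixOf (s.drop i) = true) : (i : Int) ≤ PySem.Chars.rfind.go s sub n := by
  induction n with
  | zero =>
    have hz : i = 0 := by omega
    subst hz
    rw [rfind_go_zero]
    simp only [List.drop_zero] at h
    rw [if_pos h]
    omega
  | succ j ih =>
    rw [rfind_go_succ]
    split_ifs with hp
    · omega
    · rcases Nat.lt_or_ge i (j + 1) with hlt | hge
      · exact ih (by omega)
      · have : i = j + 1 := by omega
        subst this
        exact absurd h hp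

-- rfind in terms of go
theorem str_rfind_eq_go (context : String) (c : String) :
    PySem.Str.rfind context c = PySem.Chars.rfind.go context.toList c.toList context.toList.length := by
  simp [PySem.Str.rfind_eq, PySem.Chars.rfind]

theorem rfind_ge_neg_one (context c : String) : -1 ≤ PySem.Str.rfind context c := by
  rw [str_rfind_eq_go]; exact rfind_go_ge _ _ _

theorem rfind_le_len (context c : String) : PySem.Str.rfind context c ≤ context.toList.length := by
  rw [str_rfind_eq_go]; exact rfind_go_le _ _ _

theorem rfind_occ (context c : String) (h : 0 ≤ PySem.Str.rfind context c) :
    c.toList.isPrefixOf (context.toList.drop (PySem.Str.rfind context c).toNat) = true := by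
  rw [str_rfind_eq_go] at *; exact rfind_go_occ _ _ _ h

theorem rfind_max (context c : String) (i : Nat) (hi : i ≤ context.toList.length)
    (h : c.toList.isPrefixOf (context.toList.drop i) = true) :
    (i : Int) ≤ PySem.Str.rfind context c := by
  rw [str_rfind_eq_go]; exact rfind_go_max _ _ _ i hi h

-- ---- facts about A's loop ----
theorem bestPos_ge (context : String) (cats : List String) : ∀ p, p ≤ bestPos context cats p := by
  induction cats with
  | nil => intro p; simp [bestPos]
  | cons c cs ih =>
    intro p
    have := ih (max p (PySem.Str.rfind context c))
    simp only [bestPos]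
    exact le_trans (le_max_left _ _) this

theorem bestPos_le (context : String) (cats : List String) :
    ∀ p c, c ∈ cats → PySem.Str.rfind context c ≤ bestPos context cats p := by
  induction cats with
  | nil => intro p c h; simp at h
  | cons c0 cs ih =>
    intro p c h
    rcases List.mem_cons.mp h with rfl | h
    · simp only [bestPos]
      exact le_trans (le_max_right _ _) (bestPos_ge context cs _)
    · exact ih _ c h

theorem bestPos_cases (context : String) (cats : List String) :
    ∀ p, bestPos context cats p = p ∨ ∃ c ∈ cats, PySem.Str.rfind context c = bestPos context cats p := by
  induction cats with
  | nil => intro p; left; rfl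
  | cons c0 cs ih =>
    intro p
    rcases ih (max p (PySem.Str.rfind context c0)) with h | ⟨c, hc, hval⟩
    · simp only [bestPos]
      rcases max_cases p (PySem.Str.rfind context c0) with ⟨hm, _⟩ | ⟨hm, _⟩
      · left; rw [h, hm]
      · right; exact ⟨c0, List.mem_cons_self, by rw [h, hm]⟩
    · right; exact ⟨c, List.mem_cons_of_mem _ hc, hval⟩

-- A's loop computes: keep acc if no strict improvement, else the first category
-- attaining the overall maximum
theorem aLoop_eq (context : String) (cats : List String) :
    ∀ p acc, aLoop context cats p acc =
      if bestPos context cats p = p then acc else firstAt context (bestPos context cats p) cats := by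
  induction cats with
  | nil => intro p acc; simp [aLoop, bestPos]
  | cons c cs ih =>
    intro p acc
    simp only [aLoop, bestPos, firstAt]
    set r := PySem.Str.rfind context c with hr
    by_cases hpr : r > p
    · rw [if_pos hpr]
      rw [ih r (some c)]
      have hmax : max p r = r := max_eq_right (le_of_lt hpr)
      rw [hmax]
      by_cases he : bestPos context cs r = r
      · rw [if_pos he, he]
        have hne : r ≠ p := by omega
        rw [if_neg hne, if_pos rfl]
      · rw [if_neg he]
        have hge : r ≤ bestPos context cs r := bestPos_ge context cs r
        have hne : bestPos context cs r ≠ p := by omega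
        rw [if_neg hne]
        have hne2 : ¬ (r = bestPos context cs r) := by omega
        rw [if_neg hne2]
    · rw [if_neg hpr]
      rw [ih p acc]
      have hmax : max p r = p := max_eq_left (by omega)
      rw [hmax]
      by_cases he : bestPos context cs p = p
      · rw [if_pos he, if_pos he]
      · rw [if_neg he, if_neg he]
        have hge : p ≤ bestPos context cs p := bestPos_ge context cs p
        have hne2 : ¬ (r = bestPos context cs p) := by omega
        rw [if_neg hne2]

-- ---- facts about B's loops ----
theorem checkAt_none (ctx : List Char) (i : Nat) (cats : List String)
    (h : ∀ c ∈ cats, ¬ c.toList.isPrefixOf (ctx.drop i) = true) : checkAt ctx i cats = none := by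
  induction cats with
  | nil => rfl
  | cons c cs ih =>
    simp only [checkAt, PySem.Chars.startswith]
    rw [if_neg (h c List.mem_cons_self)]
    exact ih (fun c' hc' => h c' (List.mem_cons_of_mem _ hc'))

theorem checkAt_eq_firstAt (context : String) (m : Int) (hm : 0 ≤ m)
    (hlen : m ≤ context.toList.length) (cats : List String)
    (hub : ∀ c ∈ cats, PySem.Str.rfind context c ≤ m) :
    checkAt context.toList m.toNat cats = firstAt context m cats := by
  induction cats with
  | nil => rfl
  | cons c cs ih =>
    simp only [checkAt, firstAt, PySem.Chars.startswith]
    by_cases hocc : c.toList.isPrefixOf (context.toList.drop m.toNat) = true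
    · rw [if_pos hocc]
      have h1 : (m.toNat : Int) ≤ PySem.Str.rfind context c :=
        rfind_max context c m.toNat (by omega) hocc
      have h2 : PySem.Str.rfind context c = m := by
        have := hub c List.mem_cons_self; omega
      rw [if_pos h2]
    · rw [if_neg hocc]
      have h2 : PySem.Str.rfind context c ≠ m := by
        intro he
        exact hocc (by
          have := rfind_occ context c (by omega)
          rwa [he] at this)
      rw [if_neg h2]
      exact ih (fun c' hc' => hub c' (List.mem_cons_of_mem _ hc'))

theorem firstAt_isSome (context : String) (m : Int) (cats : List String)
    (c0 : String) (h0 : c0 ∈ cats) (hv : PySem.Str.rfind context c0 = m) :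
    (firstAt context m cats).isSome = true := by
  induction cats with
  | nil => simp at h0
  | cons c cs ih =>
    simp only [firstAt]
    by_cases he : PySem.Str.rfind context c = m
    · rw [if_pos he]; rfl
    · rw [if_neg he]
      rcases List.mem_cons.mp h0 with rfl | h0
      · exact absurd hv he
      · exact ih h0

theorem scan_none (ctx : List Char) (cats : List String) :
    ∀ n, (∀ i ≤ n, checkAt ctx i cats = none) → scanBack ctx cats n = none := by
  intro n
  induction n with
  | zero => intro h; simpa [scanBack] using h 0 (le_refl 0)
  | succ j ih =>
    intro h
    simp only [scanBack]
    rw [h (j + 1) (le_refl _)]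
    exact ih (fun i hi => h i (by omega))

theorem scan_skip (ctx : List Char) (cats : List String) :
    ∀ n k, k ≤ n → (∀ i, k < i → i ≤ n → checkAt ctx i cats = none) →
      scanBack ctx cats n = scanBack ctx cats k := by
  intro n
  induction n with
  | zero =>
    intro k hk _
    have : k = 0 := Nat.le_zero.mp hk
    subst this; rfl
  | succ j ih =>
    intro k hk h
    rcases Nat.eq_or_lt_of_le hk with rfl | hlt
    · rfl
    · simp only [scanBack]
      rw [h (j + 1) hlt (le_refl _)]
      exact ih k (by omega) (fun i h1 h2 => h i h1 (by omega))

theorem scan_hit (ctx : List Char) (cats : List String) (k : Nat) (c : String)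
    (h : checkAt ctx k cats = some c) : scanBack ctx cats k = some c := by
  cases k with
  | zero => simpa [scanBack] using h
  | succ j => simp only [scanBack]; rw [h]

-- ---- main equivalence for an arbitrary context and category list ----
theorem main_eq (context : String) (cats : List String) :
    aLoop context cats (-1) none = scanBack context.toList cats context.toList.length := by
  rw [aLoop_eq context cats (-1) none]
  set m := bestPos context cats (-1) with hm
  have hub : ∀ c ∈ cats, PySem.Str.rfind context c ≤ m := fun c hc => bestPos_le context cats (-1) c hc
  by_cases hneg : m = -1
  · rw [if_pos hneg]
    have hnone : ∀ i ≤ context.toList.length, checkAt context.toList i cats = none := by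
      intro i hi
      apply checkAt_none
      intro c hc hpre
      have := rfind_max context c i hi hpre
      have := hub c hc
      omega
    rw [scan_none context.toList cats context.toList.length hnone]
  · rw [if_neg hneg]
    rcases bestPos_cases context cats (-1) with h | ⟨c0, hc0, hv0⟩
    · exact absurd h hneg
    · rw [← hm] at hv0
      have hge0 : 0 ≤ m := by
        have := rfind_ge_neg_one context c0; omega
      have hlen : m ≤ context.toList.length := by
        have := rfind_le_len context c0; omega
      have hchk : checkAt context.toList m.toNat cats = firstAt context m cats :=
        checkAt_eq_firstAt context m hge0 hlen cats hub
      have hsome : (firstAt context m cats).isSome = true :=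
        firstAt_isSome context m cats c0 hc0 hv0
      rcases Option.isSome_iff_exists.mp hsome with ⟨c, hc⟩
      have hskip : scanBack context.toList cats context.toList.length = scanBack context.toList cats m.toNat := by
        apply scan_skip context.toList cats context.toList.length m.toNat (by omega)
        intro i h1 h2
        apply checkAt_none
        intro c' hc' hpre
        have := rfind_max context c' i h2 hpre
        have := hub c' hc'
        omega
      rw [hskip, scan_hit context.toList cats m.toNat c (by rw [hchk]; exact hc), hc]

-- ===== VERDICT (by name: the statement is the Claim_ definition above) =====
theorem extract_category_from_context_py_spec : Claim_equal_extract_category_from_context_py := by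
  intro text position _
  unfold Spec_extract_category_from_context_py
  unfold extract_category_from_context_py extract_category_from_context_py_alt
  exact main_eq (PySem.Str.slice text none (some position)) pyCategories
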